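-- pv_equiv track=rewrite | github.com/karlmfvillanueva/berlin-hackathon-2026-hera | backend/src/agent/visual_systems.py | _hex_like_fragment
-- ===== SOURCE A (Python) =====
-- def _hex_like_fragment(s: str) -> bool:
--     u = s.upper()
--     for i in range(len(u) - 6):
--         window = u[i : i + 7]
--         if (
--             len(window) == 7
--             and window[0] == "#"
--             and all(c in "0123456789ABCDEF" for c in window[1:])
--         ):
--             return True
--     return False
-- ===== SOURCE B (Python) =====
-- def _hex_like_fragment(s: str) -> bool:
--     hexdigits = "0123456789abcdefABCDEF"
--     pos = s.find("#")
--     if pos == -1: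
--         return False
--     while True:
--         candidate = s[pos + 1 : pos + 7]
--         if len(candidate) == 6 and all(c in hexdigits for c in candidate):
--             return True
--         pos = s.find("#", pos + 1)
--         if pos == -1:
--             return False
-- ===== Notes on version B (the rewrite author's own statement) =====
-- stated objective: faster
-- what changed: Instead of uppercasing the string and testing a 7-character window at every index, B jumps from one hash marker to the next with str.find and checks the 6 characters after each anchor against a case-insensitive hex alphabet, returning at the first match.
import Mathlib
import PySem

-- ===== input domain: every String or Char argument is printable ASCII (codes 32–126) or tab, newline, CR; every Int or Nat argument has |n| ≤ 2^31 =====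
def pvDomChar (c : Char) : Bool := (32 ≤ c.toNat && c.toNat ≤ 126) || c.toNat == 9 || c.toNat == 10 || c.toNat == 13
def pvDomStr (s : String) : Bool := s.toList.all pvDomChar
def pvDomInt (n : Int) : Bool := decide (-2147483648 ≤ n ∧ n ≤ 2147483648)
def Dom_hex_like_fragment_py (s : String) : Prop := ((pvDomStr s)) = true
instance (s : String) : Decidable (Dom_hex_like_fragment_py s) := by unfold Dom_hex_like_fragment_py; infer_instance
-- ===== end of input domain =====

-- B replaces A's every-index 7-char-window scan by jumping between '#' anchors with
-- str.find(...) and checking the 6 characters after each anchor case-insensitively.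
set_option maxRecDepth 4096


-- ===== PORT A =====
-- u = s.upper(); for i in range(len(u) - 6): window = u[i:i+7]; if len(window) == 7 and
--   window[0] == '#' and all(c in "0123456789ABCDEF" for c in window[1:]): return True; return False
def hex_like_fragment_py (s : String) : Bool :=
  let u := PySem.Chars.upper s.toList
  (PySem.List.pyRange 0 ((u.length : Int) - 6) 1).any (fun i =>
    let window := PySem.List.slice u (some i) (some (i + 7))
    (window.length == 7)
      && (PySem.List.pyGet? window 0 == some '#')
      && (PySem.List.slice window (some 1) none).all
           (fun c => PySem.Chars.isIn [c] "0123456789ABCDEF".toList))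

-- ===== PORT B =====
-- termination helper for the find-jump loop: a successful find('#', pos+1) lands strictly
-- beyond pos and inside the string (cited in decreasing_by)
theorem hexFindFrom_bounds (l : List Char) (pos : Int)
    (h : ¬ PySem.Chars.findFrom l ['#'] (pos + 1) none = -1) :
    pos < PySem.Chars.findFrom l ['#'] (pos + 1) none ∧
      PySem.Chars.findFrom l ['#'] (pos + 1) none ≤ (l.length : Int) := by
  have hfind := PySem.Chars.neg_one_le_find
    (List.drop (if pos + 1 < 0 then if pos + 1 + (l.length : Int) < 0 then 0 else pos + 1 + (l.length : Int) else pos + 1).toNat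
      (List.take ((l.length : Int)).toNat l)) ['#']
  have hle := PySem.Chars.find_le_length
    (List.drop (if pos + 1 < 0 then if pos + 1 + (l.length : Int) < 0 then 0 else pos + 1 + (l.length : Int) else pos + 1).toNat
      (List.take ((l.length : Int)).toNat l)) ['#']
  simp only [PySem.Chars.findFrom] at h ⊢
  split_ifs at h ⊢ with h1 h2 h3 <;>
    simp_all [List.length_drop] <;> omega

-- while True: candidate = s[pos+1:pos+7]; if len(candidate) == 6 and all(c in hexdigits
--   for c in candidate): return True; pos = s.find('#', pos+1); if pos == -1: return False
def hexAltGo (l : List Char) (pos : Int) : Bool :=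
  let candidate := PySem.List.slice l (some (pos + 1)) (some (pos + 7))
  if (candidate.length == 6)
      && candidate.all (fun c => PySem.Chars.isIn [c] "0123456789abcdefABCDEF".toList) then
    true
  else
    let pos' := PySem.Chars.findFrom l ['#'] (pos + 1) none
    if pos' == -1 then false
    else hexAltGo l pos'
termination_by ((l.length : Int) + 1 - pos).toNat
decreasing_by
  rename_i hne
  simp only [beq_iff_eq] at hne
  have := hexFindFrom_bounds l pos hne
  omega

-- pos = s.find('#'); if pos == -1: return False; <loop>
def hex_like_fragment_py_alt (s : String) : Bool :=
  let pos := PySem.Chars.find s.toList ['#']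
  if pos == -1 then false
  else hexAltGo s.toList pos

-- ===== PRECONDITION & SPEC =====
def Spec_hex_like_fragment_py (s : String) (out : Bool) : Prop := out = hex_like_fragment_py_alt s
instance (s : String) (out : Bool) : Decidable (Spec_hex_like_fragment_py s out) := by unfold Spec_hex_like_fragment_py; infer_instance

-- ===== CLAIM (what is proved, stated in full; the proofs are below) =====
def Claim_equal_hex_like_fragment_py : Prop := ∀ (s : String), Dom_hex_like_fragment_py s → Spec_hex_like_fragment_py s (hex_like_fragment_py s)

-- ===== LEMMAS AND PROOFS =====

-- reference recursion: scan the tails of the raw (un-uppercased) string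
def hexRef : List Char → Bool
  | [] => false
  | c :: rest =>
      ((c == '#') && ((rest.take 6).length == 6)
        && (rest.take 6).all (fun d => PySem.Chars.isIn [d] "0123456789abcdefABCDEF".toList))
      || hexRef rest

-- the common mathematical description: a '#' at index i with 6 hex characters after it
def GoodAt (l : List Char) (i : Nat) : Prop :=
  l[i]? = some '#' ∧ ((l.drop (i + 1)).take 6).length = 6 ∧
    ∀ c ∈ (l.drop (i + 1)).take 6, c ∈ "0123456789abcdefABCDEF".toList

theorem singleton_infix_of_mem {c : Char} {m : List Char} (h : c ∈ m) : [c] <:+: m := by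
  obtain ⟨a, b, hab⟩ := List.append_of_mem h
  exact ⟨a, b, by rw [hab]; simp⟩

theorem singleton_prefix_iff (c : Char) (m : List Char) : [c] <+: m ↔ m[0]? = some c := by
  cases m with
  | nil => simp
  | cons a t => simp [List.cons_prefix_cons, eq_comm]

theorem isIn_singleton (c : Char) (t : List Char) :
    PySem.Chars.isIn [c] t = decide (c ∈ t) := by
  by_cases h : c ∈ t
  · have : [c] <:+: t := by
      obtain ⟨a, b, rfl⟩ := List.append_of_mem h
      exact ⟨a, b, by simp⟩
    simp [h, (PySem.Chars.isIn_iff_infix [c] t).mpr this]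
  · have : ¬ [c] <:+: t := fun hi => h (hi.mem (List.mem_singleton_self c))
    simp [h, PySem.Chars.isIn_eq_false_iff _ _ |>.mpr this]

theorem upperChar_bridge (c : Char) (h : c.toNat ≤ 126) :
    ((PySem.Chars.upperChar c = '#') ↔ (c = '#')) ∧
      ((PySem.Chars.upperChar c ∈ "0123456789ABCDEF".toList) ↔
        (c ∈ "0123456789abcdefABCDEF".toList)) := by
  have key : ∀ n : Nat, n < 127 →
      ((PySem.Chars.upperChar (Char.ofNat n) = '#') ↔ (Char.ofNat n = '#')) ∧
        ((PySem.Chars.upperChar (Char.ofNat n) ∈ "0123456789ABCDEF".toList) ↔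
          (Char.ofNat n ∈ "0123456789abcdefABCDEF".toList)) := by decide
  have := key c.toNat (by omega)
  rwa [Char.ofNat_toNat] at this

theorem hexRef_iff (l : List Char) : hexRef l = true ↔ ∃ i, GoodAt l i := by
  induction l with
  | nil => simp [hexRef, GoodAt]
  | cons c rest ih =>
    rw [hexRef]
    simp only [Bool.or_eq_true, Bool.and_eq_true, beq_iff_eq, List.all_eq_true, ih]
    constructor
    · rintro (⟨⟨hc, hlen⟩, hall⟩ | ⟨i, hi⟩)
      · refine ⟨0, ?_, ?_, ?_⟩
        · simp [hc]
        · simpa using hlen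
        · intro x hx
          have := hall x (by simpa using hx)
          simpa [isIn_singleton] using this
      · exact ⟨i + 1, by simpa [GoodAt] using hi⟩
    · rintro ⟨i, hi⟩
      cases i with
      | zero =>
        left
        obtain ⟨h1, h2, h3⟩ := hi
        simp only [List.getElem?_cons_zero, Option.some.injEq] at h1
        simp only [List.drop_succ_cons, List.drop_zero] at h2 h3
        exact ⟨⟨h1, h2⟩, fun x hx => by simpa [isIn_singleton] using h3 x hx⟩
      | succ j =>
        right
        exact ⟨j, by simpa [GoodAt] using hi⟩

theorem hexRef_append_of_no_hash (a b : List Char) (h : ∀ c ∈ a, c ≠ '#') :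
    hexRef (a ++ b) = hexRef b := by
  induction a with
  | nil => rfl
  | cons c t ih =>
    rw [List.cons_append, hexRef]
    have hc : (c == '#') = false := by simpa using h c (by simp)
    simp [hc, ih (fun x hx => h x (by simp [hx]))]

theorem hexRef_of_no_hash (a : List Char) (h : ∀ c ∈ a, c ≠ '#') :
    hexRef a = false := by
  have := hexRef_append_of_no_hash a [] h
  simpa [hexRef] using this

theorem windowA (u : List Char) (k : Nat) :
    PySem.List.slice u (some (k : Int)) (some ((k : Int) + 7)) = (u.drop k).take 7 := by
  rw [PySem.List.slice_toNat u (by positivity) (by positivity)]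
  have h1 : ((k : Int) + 7).toNat = k + 7 := by omega
  have h2 : ((k : Int)).toNat = k := by omega
  rw [h1, h2]
  congr 1
  omega

-- the per-index condition of A's scan, characterised over the raw string

theorem condA_iff (l : List Char) (hd : ∀ c ∈ l, c.toNat ≤ 126) (k : Nat) :
    (((((PySem.Chars.upper l).drop k).take 7).length == 7)
      && (PySem.List.pyGet? (((PySem.Chars.upper l).drop k).take 7) 0 == some '#')
      && (PySem.List.slice (((PySem.Chars.upper l).drop k).take 7) (some 1) none).all
           (fun c => PySem.Chars.isIn [c] "0123456789ABCDEF".toList)) = true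
    ↔ (k + 7 ≤ l.length ∧ GoodAt l k) := by
  have hulen : (PySem.Chars.upper l).length = l.length := by
    simp [PySem.Chars.upper]
  rw [PySem.List.slice_from _ (by norm_num)]
  have hz : (0 : Int) = ((0 : Nat) : Int) := rfl
  have hone : ((1 : Int)).toNat = 1 := rfl
  rw [hone]
  simp only [Bool.and_eq_true, beq_iff_eq, List.length_take, List.length_drop, hulen,
    List.all_eq_true]
  constructor
  · rintro ⟨⟨hlen, hget⟩, hall⟩
    have hk7 : k + 7 ≤ l.length := by omega
    have hgetl : (PySem.Chars.upper l)[k]? = some '#' := by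
      rw [hz, PySem.List.pyGet?_natCast] at hget
      rw [← hget]
      rw [List.getElem?_take, if_pos (by omega), List.getElem?_drop]
      simp
    have hdrop : (((PySem.Chars.upper l).drop k).take 7).drop 1
        = ((PySem.Chars.upper l).drop (k + 1)).take 6 := by
      rw [List.drop_take, List.drop_drop]
    refine ⟨hk7, ?_, ?_, ?_⟩
    · simp only [PySem.Chars.upper, List.getElem?_map] at hgetl
      obtain ⟨c, hc, hcu⟩ := Option.map_eq_some_iff.mp hgetl
      have := (upperChar_bridge c (hd c (List.mem_of_getElem? hc))).1.mp hcu
      rwa [this] at hc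
    · simp only [List.length_take, List.length_drop]
      omega
    · intro c hc
      have hmem : PySem.Chars.upperChar c ∈ ((PySem.Chars.upper l).drop (k + 1)).take 6 := by
        simp only [PySem.Chars.upper, ← List.map_drop, ← List.map_take]
        exact List.mem_map_of_mem hc
      have := hall _ (hdrop ▸ hmem)
      rw [isIn_singleton] at this
      exact (upperChar_bridge c (hd c (List.mem_of_mem_drop (List.mem_of_mem_take hc)))).2.mp
        (by simpa using this)
  · rintro ⟨hk7, hget, hlen6, hall⟩
    have hdrop : (((PySem.Chars.upper l).drop k).take 7).drop 1
        = ((PySem.Chars.upper l).drop (k + 1)).take 6 := by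
      rw [List.drop_take, List.drop_drop]
    refine ⟨⟨by omega, ?_⟩, ?_⟩
    · rw [hz, PySem.List.pyGet?_natCast, List.getElem?_take, if_pos (by omega), List.getElem?_drop]
      simp only [Nat.add_zero, PySem.Chars.upper, List.getElem?_map, hget, Option.map_some]
      simp [(upperChar_bridge '#' (by decide)).1.mpr rfl]
    · intro c hc
      rw [hdrop] at hc
      simp only [PySem.Chars.upper, ← List.map_drop, ← List.map_take] at hc
      obtain ⟨d, hd', rfl⟩ := List.mem_map.mp hc
      rw [isIn_singleton]
      simpa using (upperChar_bridge d
        (hd d (List.mem_of_mem_drop (List.mem_of_mem_take hd')))).2.mpr (hall d hd')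

theorem portA_iff (s : String) (hd : ∀ c ∈ s.toList, c.toNat ≤ 126) :
    hex_like_fragment_py s = true ↔ ∃ i, GoodAt s.toList i := by
  unfold hex_like_fragment_py
  simp only [List.any_eq_true]
  have hulen : (PySem.Chars.upper s.toList).length = s.toList.length := by
    simp [PySem.Chars.upper]
  constructor
  · rintro ⟨i, him, hf⟩
    obtain ⟨h0, hlt⟩ := (PySem.List.mem_pyRange_one).mp him
    obtain ⟨k, rfl⟩ := Int.eq_ofNat_of_zero_le h0
    rw [windowA] at hf
    exact ⟨k, ((condA_iff s.toList hd k).mp hf).2⟩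
  · rintro ⟨k, hg⟩
    have hk7 : k + 7 ≤ s.toList.length := by
      obtain ⟨_, hlen6, _⟩ := hg
      simp only [List.length_take, List.length_drop] at hlen6
      omega
    refine ⟨(k : Int), PySem.List.mem_pyRange_one.mpr ⟨by positivity, by
      rw [hulen]; omega⟩, ?_⟩
    rw [windowA]
    exact (condA_iff s.toList hd k).mpr ⟨hk7, hg⟩

theorem take_no_hash (m : List Char) (q : Nat)
    (h : ∀ i < q, ¬ ['#'] <+: m.drop i) : ∀ c ∈ m.take q, c ≠ '#' := by
  intro c hc rfl
  obtain ⟨j, hj, hje⟩ := List.mem_take_iff_getElem.mp hc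
  exact h j (by omega) ((singleton_prefix_iff _ _).mpr (by
    rw [List.getElem?_drop]
    simp [List.getElem?_eq_getElem (by omega : j < m.length), hje]))

theorem hexAltGo_eq (l : List Char) (p : Nat) (hp : p < l.length)
    (hh : l[p]? = some '#') : hexAltGo l (p : Int) = hexRef (l.drop p) := by
  induction hn : l.length - p using Nat.strong_induction_on generalizing p with
  | _ n ih =>
  subst hn
  have hpe : l[p] = '#' := by
    have := List.getElem?_eq_getElem hp
    rw [hh] at this
    exact (Option.some.injEq _ _ ▸ this.symm :)
  have hdropp : l.drop p = '#' :: l.drop (p + 1) := by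
    rw [List.drop_eq_getElem_cons hp, hpe]
  rw [hexAltGo]
  have hcand : PySem.List.slice l (some ((p : Int) + 1)) (some ((p : Int) + 7))
      = (l.drop (p + 1)).take 6 := by
    rw [PySem.List.slice_toNat l (by positivity) (by positivity)]
    have h1 : ((p : Int) + 1).toNat = p + 1 := by omega
    have h7 : ((p : Int) + 7).toNat = p + 7 := by omega
    rw [h1, h7]
    congr 1
    omega
  rw [hcand, hdropp, hexRef]
  simp only [beq_self_eq_true, Bool.true_and]
  by_cases hcond : (((l.drop (p + 1)).take 6).length == 6)
      && ((l.drop (p + 1)).take 6).all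
        (fun c => PySem.Chars.isIn [c] "0123456789abcdefABCDEF".toList)
  · simp only [hcond, if_true, Bool.true_or]
  · simp only [hcond, Bool.false_or]
    have hff := PySem.Chars.findFrom_natCast l ['#'] (p + 1) (by omega)
    have hcast : (p : Int) + 1 = ((p + 1 : Nat) : Int) := by push_cast; ring
    rw [hcast, hff]
    by_cases hfind : PySem.Chars.find (l.drop (p + 1)) ['#'] = -1
    · rw [if_pos hfind]
      simp only [beq_self_eq_true, if_pos]
      have hno : ∀ c ∈ l.drop (p + 1), c ≠ '#' := by
        intro c hc rfl
        exact (PySem.Chars.find_ne_neg_one_iff _ _).mpr (singleton_infix_of_mem hc) hfind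
      rw [hexRef_of_no_hash _ hno]
      simp
    · rw [if_neg hfind]
      have hq0 : 0 ≤ PySem.Chars.find (l.drop (p + 1)) ['#'] := by
        have := PySem.Chars.neg_one_le_find (l.drop (p + 1)) ['#']
        omega
      set q := (PySem.Chars.find (l.drop (p + 1)) ['#']).toNat with hqdef
      have hqc : PySem.Chars.find (l.drop (p + 1)) ['#'] = (q : Int) :=
        (Int.toNat_of_nonneg hq0).symm
      obtain ⟨hpre, hmin⟩ := PySem.Chars.find_spec hq0
      have hql : q < (l.drop (p + 1)).length := by
        have := hpre.length_le
        simp only [List.length_drop, List.length_singleton] at this ⊢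
        omega
      set k := p + 1 + q with hkdef
      have hdd : (l.drop (p + 1)).drop q = l.drop k := by
        rw [List.drop_drop]
      have hkl : k < l.length := by
        simp only [List.length_drop] at hql
        omega
      have hkh : l[k]? = some '#' := by
        rw [hdd] at hpre
        have := (singleton_prefix_iff _ _).mp hpre
        rwa [List.getElem?_drop, Nat.add_zero] at this
      have hne : ¬ ((p + 1 : Nat) : Int) + PySem.Chars.find (l.drop (p + 1)) ['#'] = -1 := by
        rw [hqc]
        omega
      rw [if_neg (by simpa using hne)]
      have hcast2 : ((p + 1 : Nat) : Int) + PySem.Chars.find (l.drop (p + 1)) ['#'] = ((k : Int)) := by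
        rw [hqc]
        push_cast
        omega
      rw [hcast2]
      rw [ih (l.length - k) (by omega) k hkl hkh rfl]
      have htop : ∀ c ∈ (l.drop (p + 1)).take q, c ≠ '#' := by
        refine take_no_hash _ _ ?_
        intro i hi
        exact hmin i (by omega)
      calc hexRef (l.drop k) = hexRef ((l.drop (p + 1)).take q ++ (l.drop (p + 1)).drop q) := by
            rw [hexRef_append_of_no_hash _ _ htop, hdd]
        _ = hexRef (l.drop (p + 1)) := by rw [List.take_append_drop]
      -- orient: goal is hexRef (l.drop k) = hexRef (l.drop (p+1))? check

theorem portB_eq_ref (s : String) : hex_like_fragment_py_alt s = hexRef s.toList := by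
  unfold hex_like_fragment_py_alt
  by_cases hf : PySem.Chars.find s.toList ['#'] = -1
  · rw [if_pos (by simpa using hf)]
    have hno : ∀ c ∈ s.toList, c ≠ '#' := by
      intro c hc rfl
      exact (PySem.Chars.find_ne_neg_one_iff _ _).mpr (singleton_infix_of_mem hc) hf
    rw [hexRef_of_no_hash _ hno]
  · rw [if_neg (by simpa using hf)]
    have hq0 : 0 ≤ PySem.Chars.find s.toList ['#'] := by
      have := PySem.Chars.neg_one_le_find s.toList ['#']
      omega
    set p := (PySem.Chars.find s.toList ['#']).toNat with hpdef
    have hqc : PySem.Chars.find s.toList ['#'] = (p : Int) := (Int.toNat_of_nonneg hq0).symm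
    obtain ⟨hpre, hmin⟩ := PySem.Chars.find_spec hq0
    have hpl : p < s.toList.length := by
      have := hpre.length_le
      simp only [List.length_drop, List.length_singleton] at this
      omega
    have hph : s.toList[p]? = some '#' := by
      have := (singleton_prefix_iff _ _).mp hpre
      rwa [List.getElem?_drop, Nat.add_zero] at this
    rw [hqc, hexAltGo_eq s.toList p hpl hph]
    have htop : ∀ c ∈ s.toList.take p, c ≠ '#' := take_no_hash _ _ hmin
    conv_rhs => rw [← List.take_append_drop p s.toList]
    rw [hexRef_append_of_no_hash _ _ htop]

-- ===== VERDICT (by name: the statement is the Claim_ definition above) =====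
theorem hex_like_fragment_py_spec : Claim_equal_hex_like_fragment_py := by
  intro s hDom
  unfold Spec_hex_like_fragment_py
  have hd : ∀ c ∈ s.toList, c.toNat ≤ 126 := by
    intro c hc
    have := List.all_eq_true.mp hDom c hc
    simp only [pvDomChar, Bool.or_eq_true, Bool.and_eq_true, decide_eq_true_eq, beq_iff_eq] at this
    omega
  rw [portB_eq_ref]
  exact Bool.eq_iff_iff.mpr ((portA_iff s hd).trans (hexRef_iff s.toList).symm)
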